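-- pv_equiv track=rewrite | github.com/jackinf/aoc | day18/main_option1.py | count_closed_sides_in_grid
-- ===== SOURCE A (Python) =====
-- def count_closed_sides_in_grid(groups):
--     closed_sides_count = 0
--     intersections = set()
--
--     for grouping_index, squares_set in groups.items():
--         for a, b in squares_set:
--             nei1, nei2, nei3, nei4 = (a-1, b), (a+1, b), (a, b-1), (a, b+1)
--
--             if nei1 in squares_set:
--                 closed_sides_count += 1
--                 intersections.add((nei1, (a, b)))
--
--             if nei2 in squares_set:
--                 closed_sides_count += 1
--                 intersections.add(((a, b), nei2))
--
--             if nei3 in squares_set: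
--                 closed_sides_count += 1
--                 intersections.add((nei3, (a, b)))
--
--             if nei4 in squares_set:
--                 closed_sides_count += 1
--                 intersections.add(((a, b), nei4))
--
--     return closed_sides_count, intersections
-- ===== SOURCE B (Python) =====
-- def count_closed_sides_in_grid(groups):
--     closed_sides_count = 0
--     intersections = set()
--
--     for squares_set in groups.values():
--         # Visit each adjacent pair exactly once, at whichever endpoint is reached
--         # first: a neighbouring square that was already visited means its pair was
--         # handled then.  Every pair closes two sides (one side of each square).
--         visited = set()
--         for a, b in squares_set:
--             for q, edge in (((a - 1, b), ((a - 1, b), (a, b))),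
--                             ((a + 1, b), ((a, b), (a + 1, b))),
--                             ((a, b - 1), ((a, b - 1), (a, b))),
--                             ((a, b + 1), ((a, b), (a, b + 1)))):
--                 if q in squares_set and q not in visited:
--                     closed_sides_count += 2
--                     intersections.add(edge)
--             visited.add((a, b))
--
--     return closed_sides_count, intersections
-- ===== Notes on version B (the rewrite author's own statement) =====
-- stated objective: alternative
-- what changed: Instead of counting all four neighbour incidences of every square and deduplicating the pair tuples through the set, B visits each adjacent pair exactly once -- at whichever endpoint is scanned first, detected with a per-group visited set -- adding 2 to the count (one closed side per square of the pair) and inserting the pair's tuple once.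
import Mathlib
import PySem

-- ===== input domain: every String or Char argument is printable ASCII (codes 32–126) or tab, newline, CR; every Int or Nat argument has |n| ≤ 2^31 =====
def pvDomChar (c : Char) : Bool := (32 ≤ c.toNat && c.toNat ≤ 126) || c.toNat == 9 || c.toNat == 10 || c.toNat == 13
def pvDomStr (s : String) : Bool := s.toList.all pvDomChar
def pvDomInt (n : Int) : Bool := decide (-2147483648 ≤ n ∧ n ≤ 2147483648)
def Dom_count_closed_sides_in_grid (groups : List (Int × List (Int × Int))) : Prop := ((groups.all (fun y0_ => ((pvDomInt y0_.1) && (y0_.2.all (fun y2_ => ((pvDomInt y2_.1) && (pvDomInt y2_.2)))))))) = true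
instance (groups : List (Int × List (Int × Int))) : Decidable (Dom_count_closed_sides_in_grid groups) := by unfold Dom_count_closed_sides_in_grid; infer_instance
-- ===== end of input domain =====

-- B visits each adjacent pair once (at the endpoint scanned first, tracked with a visited set),
-- adding 2 per pair, instead of A's per-incidence counting with pair-set deduplication.


-- ===== PORT A =====
def count_closed_sides_in_grid (groups : List (Int × List (Int × Int))) : Int × (List ((Int × Int) × (Int × Int))) :=
  groups.foldl (fun st g =>
    g.2.foldl (fun st2 p =>
      let a := p.1
      let b := p.2
      let nei1 : Int × Int := (a - 1, b)
      let nei2 : Int × Int := (a + 1, b)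
      let nei3 : Int × Int := (a, b - 1)
      let nei4 : Int × Int := (a, b + 1)
      let st2 := if PySem.Set.contains g.2 nei1 then (st2.1 + 1, PySem.Set.add st2.2 (nei1, (a, b))) else st2
      let st2 := if PySem.Set.contains g.2 nei2 then (st2.1 + 1, PySem.Set.add st2.2 ((a, b), nei2)) else st2
      let st2 := if PySem.Set.contains g.2 nei3 then (st2.1 + 1, PySem.Set.add st2.2 (nei3, (a, b))) else st2
      let st2 := if PySem.Set.contains g.2 nei4 then (st2.1 + 1, PySem.Set.add st2.2 ((a, b), nei4)) else st2
      st2) st) ((0 : Int), ([] : List ((Int × Int) × (Int × Int))))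

-- ===== PORT B =====
-- the literal tuple of (neighbour, edge) pairs from Source B's inner 'for q, edge in …'
def pvItems (p : Int × Int) : List ((Int × Int) × ((Int × Int) × (Int × Int))) :=
  [((p.1 - 1, p.2), ((p.1 - 1, p.2), (p.1, p.2))),
   ((p.1 + 1, p.2), ((p.1, p.2), (p.1 + 1, p.2))),
   ((p.1, p.2 - 1), ((p.1, p.2 - 1), (p.1, p.2))),
   ((p.1, p.2 + 1), ((p.1, p.2), (p.1, p.2 + 1)))]

def count_closed_sides_in_grid_alt (groups : List (Int × List (Int × Int))) : Int × (List ((Int × Int) × (Int × Int))) :=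
  groups.foldl (fun st g =>
    (g.2.foldl (fun (st2 : (Int × List ((Int × Int) × (Int × Int))) × List (Int × Int)) p =>
        let inner := (pvItems p).foldl (fun st3 qe =>
            if PySem.Set.contains g.2 qe.1 && !(PySem.Set.contains st2.2 qe.1)
            then (st3.1 + 2, PySem.Set.add st3.2 qe.2) else st3) st2.1
        (inner, PySem.Set.add st2.2 p))
      (st, ([] : List (Int × Int)))).1)
    ((0 : Int), ([] : List ((Int × Int) × (Int × Int))))

-- ===== PRECONDITION & SPEC =====
-- Pre_: every group's square list is duplicate-free — it encodes a Python set, so a list with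
-- duplicates corresponds to no Python input (Pre_ excludes nothing the Python A accepts).
def Pre_count_closed_sides_in_grid (groups : List (Int × List (Int × Int))) : Prop :=
  ∀ g ∈ groups, g.2.Nodup
instance (groups : List (Int × List (Int × Int))) : Decidable (Pre_count_closed_sides_in_grid groups) := by unfold Pre_count_closed_sides_in_grid; infer_instance

def pvWitness_count_closed_sides_in_grid : (List (Int × List (Int × Int))) :=
  [(0, [(0, 0), (1, 0), (0, 1)]), (1, [(5, 5)])]

def Spec_count_closed_sides_in_grid (groups : List (Int × List (Int × Int))) (out : Int × (List ((Int × Int) × (Int × Int)))) : Prop := out = count_closed_sides_in_grid_alt groups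
instance (groups : List (Int × List (Int × Int))) (out : Int × (List ((Int × Int) × (Int × Int)))) : Decidable (Spec_count_closed_sides_in_grid groups out) := by unfold Spec_count_closed_sides_in_grid; infer_instance

-- ===== CLAIM (what is proved, stated in full; the proofs are below) =====
def Claim_equal_count_closed_sides_in_grid : Prop := ∀ (groups : List (Int × List (Int × Int))), Dom_count_closed_sides_in_grid groups → Pre_count_closed_sides_in_grid groups → Spec_count_closed_sides_in_grid groups (count_closed_sides_in_grid groups)

-- ===== LEMMAS AND PROOFS =====

def pvHits (s : List (Int × Int)) (p : Int × Int) : List ((Int × Int) × (Int × Int)) :=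
  ((pvItems p).filter (fun x => PySem.Set.contains s x.1)).map (·.2)
def pvDeg (u : List (Int × Int)) (p : Int × Int) : Nat :=
  (pvItems p).countP (fun x => decide (x.1 ∈ u))
def pvAdj (y q : Int × Int) : Bool :=
  decide (q = (y.1 - 1, y.2)) || decide (q = (y.1 + 1, y.2)) ||
  decide (q = (y.1, y.2 - 1)) || decide (q = (y.1, y.2 + 1))
lemma pvCountPOr {α : Type} (l : List α) (P Q : α → Bool)
    (h : ∀ x ∈ l, ¬(P x = true ∧ Q x = true)) :
    l.countP (fun x => P x || Q x) = l.countP P + l.countP Q := by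
  induction l with
  | nil => simp
  | cons a l ih =>
      have ha := h a (List.mem_cons_self)
      have ih' := ih (fun x hx => h x (List.mem_cons_of_mem _ hx))
      cases hP : P a <;> cases hQ : Q a
      · simp [List.countP_cons, hP, hQ, ih']
      · simp [List.countP_cons, hP, hQ, ih']; omega
      · simp [List.countP_cons, hP, hQ, ih']; omega
      · exact absurd ⟨hP, hQ⟩ ha

lemma pvCountEqSingle (t : List (Int × Int)) (c : Int × Int) (ht : t.Nodup) :
    t.countP (fun y => decide (y = c)) = if c ∈ t then 1 else 0 := by
  have h1 : t.countP (fun y => decide (y = c)) = t.count c := by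
    rw [List.count_eq_countP]
    exact List.countP_congr (fun x _ => by simp)
  rw [h1, List.Nodup.count ht]

lemma pvSym (t : List (Int × Int)) (p : Int × Int) (ht : t.Nodup) :
    t.countP (fun y => pvAdj y p) = pvDeg t p := by
  have e1 : t.countP (fun y => pvAdj y p)
      = t.countP (fun y => (decide (y = (p.1 + 1, p.2)) || decide (y = (p.1 - 1, p.2))
          || decide (y = (p.1, p.2 + 1))) || decide (y = (p.1, p.2 - 1))) :=
    List.countP_congr (fun y _ => by
      simp only [pvAdj, Bool.or_eq_true, decide_eq_true_eq, Prod.ext_iff]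
      constructor <;> rintro (((h|h)|h)|h) <;> [skip;skip;skip;skip;skip;skip;skip;skip] <;> omega)
  rw [e1]
  rw [pvCountPOr _ _ _ (fun x _ => by simp [Prod.ext_iff]; omega)]
  rw [pvCountPOr _ _ _ (fun x _ => by simp [Prod.ext_iff]; omega)]
  rw [pvCountPOr _ _ _ (fun x _ => by simp [Prod.ext_iff]; omega)]
  rw [pvCountEqSingle t _ ht, pvCountEqSingle t _ ht, pvCountEqSingle t _ ht, pvCountEqSingle t _ ht]
  simp only [pvDeg, pvItems, List.countP_cons, List.countP_nil]
  split_ifs <;> simp_all <;> omega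

lemma pvContainsEq (s : List (Int × Int)) (q : Int × Int) :
    PySem.Set.contains s q = decide (q ∈ s) := by
  by_cases h : q ∈ s <;> simp [h]

lemma pvMirror (s : List (Int × Int)) (p : Int × Int)
    (x : (Int × Int) × ((Int × Int) × (Int × Int))) (hp : p ∈ s)
    (hx : x ∈ pvItems p) (hq : x.1 ∈ s) : x.2 ∈ pvHits s x.1 := by
  obtain ⟨p1, p2⟩ := p
  have hps : PySem.Set.contains s (p1, p2) = true := by rw [pvContainsEq]; simpa using hp
  simp only [pvItems, List.mem_cons, List.not_mem_nil, or_false] at hx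
  rcases hx with h | h | h | h <;> subst h <;>
    simp only [pvHits, pvItems, List.mem_map, List.mem_filter, List.mem_cons] <;>
    refine ⟨?_, ⟨?_, ?_⟩, ?_⟩
  · exact ((p1 - 1 + 1, p2), ((p1 - 1, p2), (p1 - 1 + 1, p2)))
  · right; left; rfl
  · simpa using hps
  · norm_num
  · exact ((p1 + 1 - 1, p2), ((p1 + 1 - 1, p2), (p1 + 1, p2)))
  · left; rfl
  · simpa using hps
  · norm_num
  · exact ((p1, p2 - 1 + 1), ((p1, p2 - 1), (p1, p2 - 1 + 1)))
  · right; right; right; left; rfl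
  · simpa using hps
  · norm_num
  · exact ((p1, p2 + 1 - 1), ((p1, p2 + 1 - 1), (p1, p2 + 1)))
  · right; right; left; rfl
  · simpa using hps
  · norm_num

def pvNew (s v : List (Int × Int)) (p : Int × Int) : List ((Int × Int) × (Int × Int)) :=
  ((pvItems p).filter (fun x => PySem.Set.contains s x.1 && !(PySem.Set.contains v x.1))).map (·.2)

def pvBcollect (s : List (Int × Int)) : List (Int × Int) → List (Int × Int) → List ((Int × Int) × (Int × Int))
  | [], _ => []
  | p :: t, v => pvNew s v p ++ pvBcollect s t (PySem.Set.add v p)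

lemma pvFstNe (p : Int × Int) (x : (Int × Int) × ((Int × Int) × (Int × Int)))
    (hx : x ∈ pvItems p) : x.1 ≠ p := by
  obtain ⟨p1, p2⟩ := p
  simp [pvItems] at hx
  rcases hx with h | h | h | h <;> subst h <;> simp [Prod.ext_iff] <;> omega

lemma pvCountEqAdj (y q : Int × Int) :
    (pvItems y).countP (fun x => decide (x.1 = q)) = if pvAdj y q then 1 else 0 := by
  obtain ⟨y1, y2⟩ := y
  obtain ⟨a, b⟩ := q
  simp only [pvItems, pvAdj, List.countP_cons, List.countP_nil, Prod.ext_iff]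
  split_ifs <;> simp_all <;> omega

lemma pvMemFold (l : List ((Int × Int) × (Int × Int))) (es : List ((Int × Int) × (Int × Int)))
    (y : (Int × Int) × (Int × Int)) :
    y ∈ l.foldl PySem.Set.add es ↔ y ∈ es ∨ y ∈ l := by
  simpa using PySem.Set.mem_foldl_add l id es y

lemma pvFoldSkip {K E : Type} [BEq E] [LawfulBEq E] (l : List (K × E)) (Q : K × E → Bool)
    (es : List E) (h : ∀ x ∈ l, Q x = false → x.2 ∈ es) :
    ((l.filter Q).map (·.2)).foldl PySem.Set.add es = (l.map (·.2)).foldl PySem.Set.add es := by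
  induction l generalizing es with
  | nil => simp
  | cons x l ih =>
      cases hQ : Q x
      · have hx := h x (List.mem_cons_self) hQ
        simp only [List.filter_cons, hQ, cond_false, List.map_cons, List.foldl_cons,
          PySem.Set.add_of_mem hx]
        exact ih es (fun y hy hQy => h y (List.mem_cons_of_mem _ hy) hQy)
      · simp only [List.filter_cons, hQ, cond_true, List.map_cons, List.foldl_cons]
        exact ih (PySem.Set.add es x.2)
          (fun y hy hQy => (PySem.Set.mem_add _ _ _).mpr (Or.inl (h y (List.mem_cons_of_mem _ hy) hQy)))

lemma pvSumSplit (l : List (Int × Int)) (f g h : (Int × Int) → Nat)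
    (hfg : ∀ y ∈ l, f y = g y + h y) :
    (l.map f).sum = (l.map g).sum + (l.map h).sum := by
  induction l with
  | nil => simp
  | cons a l ih =>
      simp only [List.map_cons, List.sum_cons, hfg a (List.mem_cons_self),
        ih (fun y hy => hfg y (List.mem_cons_of_mem _ hy))]
      omega

lemma pvSumIndicator (l : List (Int × Int)) (P : (Int × Int) → Bool) :
    (l.map (fun y => if P y then 1 else 0)).sum = l.countP P := by
  induction l with
  | nil => simp
  | cons a l ih => cases hP : P a <;> simp [List.countP_cons, hP, ih] <;> omega

lemma pvMain (s : List (Int × Int)) (suf : List (Int × Int)) :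
    ∀ (pre v : List (Int × Int)) (es : List ((Int × Int) × (Int × Int))),
    s = pre ++ suf → s.Nodup →
    (∀ q : Int × Int, PySem.Set.contains v q = decide (q ∈ pre)) →
    (∀ p' ∈ pre, ∀ e ∈ pvHits s p', e ∈ es) →
    (suf.flatMap (pvHits s)).length
        = 2 * (pvBcollect s suf v).length + (suf.map (fun y => pvDeg pre y)).sum
    ∧ (suf.flatMap (pvHits s)).foldl PySem.Set.add es
        = (pvBcollect s suf v).foldl PySem.Set.add es := by
  induction suf with
  | nil => intro pre v es hs hnd hv hes; simp [pvBcollect]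
  | cons p t ih =>
      intro pre v es hs hnd hv hes
      have hnd' : (pre ++ p :: t).Nodup := hs ▸ hnd
      have hpre_nd : pre.Nodup := (List.nodup_append.mp hnd').1
      have hpt_nd : (p :: t).Nodup := (List.nodup_append.mp hnd').2.1
      have ht_nd : t.Nodup := (List.nodup_cons.mp hpt_nd).2
      have hp_t : p ∉ t := (List.nodup_cons.mp hpt_nd).1
      have hdisj : ∀ q, q ∈ pre → q ∈ p :: t → False := by
        intro q h1 h2
        exact (List.nodup_append.mp hnd').2.2 q h1 q h2 rfl
      have hp_pre : p ∉ pre := fun h => hdisj p h (List.mem_cons_self)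
      have hmem : ∀ q : Int × Int, q ∈ s ↔ q ∈ pre ∨ q = p ∨ q ∈ t := by
        intro q; rw [hs]; simp
      have hp_s : p ∈ s := (hmem p).mpr (Or.inr (Or.inl rfl))
      -- (b) hits length splits over pre and t
      have hb : (pvHits s p).length = pvDeg pre p + pvDeg t p := by
        rw [pvHits, List.length_map, ← List.countP_eq_length_filter]
        rw [List.countP_congr (q := fun x => decide (x.1 ∈ pre) || decide (x.1 ∈ t))
          (fun x hx => by
            have hne := pvFstNe p x hx
            rw [pvContainsEq]
            simp only [decide_eq_true_eq, Bool.or_eq_true, hmem x.1]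
            constructor
            · rintro (h | h | h)
              · exact Or.inl h
              · exact absurd h hne
              · exact Or.inr h
            · rintro (h | h)
              · exact Or.inl h
              · exact Or.inr (Or.inr h))]
        exact pvCountPOr _ _ _ (fun x _ => by
          rintro ⟨h1, h2⟩
          simp only [decide_eq_true_eq] at h1 h2
          exact hdisj x.1 h1 (List.mem_cons_of_mem _ h2))
      -- (a) new length is the neighbours in t
      have ha : (pvNew s v p).length = pvDeg t p := by
        rw [pvNew, List.length_map, ← List.countP_eq_length_filter, pvDeg]
        refine List.countP_congr (fun x hx => ?_)
        have hne := pvFstNe p x hx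
        rw [pvContainsEq, hv x.1]
        simp only [Bool.and_eq_true, Bool.not_eq_true', decide_eq_false_iff_not,
          decide_eq_true_eq, hmem x.1]
        constructor
        · rintro ⟨h1 | h1 | h1, h2⟩
          · exact absurd h1 h2
          · exact absurd h1 hne
          · exact h1
        · intro h
          exact ⟨Or.inr (Or.inr h), fun hpre => hdisj x.1 hpre (List.mem_cons_of_mem _ h)⟩
      -- (c) prefix degree gains the adjacency to p
      have hc : (t.map (fun y => pvDeg (pre ++ [p]) y)).sum
          = (t.map (fun y => pvDeg pre y)).sum + pvDeg t p := by
        rw [pvSumSplit t _ (fun y => pvDeg pre y) (fun y => if pvAdj y p then 1 else 0)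
          (fun y hy => by
            rw [pvDeg]
            rw [List.countP_congr (q := fun x => decide (x.1 ∈ pre) || decide (x.1 = p))
              (fun x hx => by simp)]
            rw [pvCountPOr _ _ _ (fun x _ => by
              rintro ⟨h1, h2⟩
              simp only [decide_eq_true_eq] at h1 h2
              exact hp_pre (h2 ▸ h1))]
            rw [pvCountEqAdj y p]
            rfl)]
        rw [pvSumIndicator t (fun y => pvAdj y p), pvSym t p ht_nd]
      -- (d) the two set folds agree on this square
      have hd : (pvHits s p).foldl PySem.Set.add es = (pvNew s v p).foldl PySem.Set.add es := by
        have hq : ∀ x ∈ (pvItems p).filter (fun x => PySem.Set.contains s x.1),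
            (!(PySem.Set.contains v x.1)) = false → x.2 ∈ es := by
          intro x hx hQ
          obtain ⟨hxi, hcs⟩ := List.mem_filter.mp hx
          have hQ' : PySem.Set.contains v x.1 = true := by simpa using hQ
          have hx1pre : x.1 ∈ pre := by
            have := hv x.1
            rw [hQ'] at this
            exact of_decide_eq_true this.symm
          have hx1s : x.1 ∈ s := by
            rw [pvContainsEq] at hcs; exact of_decide_eq_true hcs
          exact hes x.1 hx1pre _ (pvMirror s p x hp_s hxi hx1s)
        have := pvFoldSkip ((pvItems p).filter (fun x => PySem.Set.contains s x.1))
          (fun x => !(PySem.Set.contains v x.1)) es hq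
        rw [List.filter_filter] at this
        rw [List.filter_congr (l := pvItems p)
          (fun x _ => Bool.and_comm (!PySem.Set.contains v x.1) (PySem.Set.contains s x.1))] at this
        rw [pvHits, pvNew, ← this]
      -- (e) visited extended
      have hv' : ∀ q : Int × Int, PySem.Set.contains (PySem.Set.add v p) q
          = decide (q ∈ pre ++ [p]) := by
        intro q
        rw [pvContainsEq]
        refine decide_eq_decide.mpr ?_
        rw [PySem.Set.mem_add]
        have hvq : q ∈ v ↔ q ∈ pre := by
          have h1 := hv q
          rw [pvContainsEq] at h1
          exact decide_eq_decide.mp h1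
        simp [hvq]
      -- (f) accumulated edges extended
      have hes' : ∀ p' ∈ pre ++ [p], ∀ e ∈ pvHits s p',
          e ∈ (pvHits s p).foldl PySem.Set.add es := by
        intro p' hp' e he
        rcases List.mem_append.mp hp' with h | h
        · exact (pvMemFold _ _ _).mpr (Or.inl (hes p' h e he))
        · rw [List.mem_singleton] at h
          subst h
          exact (pvMemFold _ _ _).mpr (Or.inr he)
      obtain ⟨ihlen, ihset⟩ := ih (pre ++ [p]) (PySem.Set.add v p)
        ((pvHits s p).foldl PySem.Set.add es)
        (by rw [hs, List.append_assoc, List.singleton_append]) hnd hv' hes'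
      constructor
      · simp only [List.flatMap_cons, List.length_append, pvBcollect, List.map_cons,
          List.sum_cons, ihlen, hb, ha, hc]
        omega
      · simp only [List.flatMap_cons, List.foldl_append, pvBcollect]
        rw [ihset, hd]

lemma pvDegNil (y : Int × Int) : pvDeg [] y = 0 := by
  simp [pvDeg, pvItems]

lemma pvGroup (s : List (Int × Int)) (hnd : s.Nodup) (c : Int)
    (es : List ((Int × Int) × (Int × Int))) :
    (c + ((s.flatMap (pvHits s)).length : Int), (s.flatMap (pvHits s)).foldl PySem.Set.add es)
      = (c + 2 * ((pvBcollect s s []).length : Int),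
         (pvBcollect s s []).foldl PySem.Set.add es) := by
  obtain ⟨hlen, hset⟩ := pvMain s s [] [] es (List.nil_append s).symm hnd
    (fun q => by simp) (fun p' h => absurd h (List.not_mem_nil))
  have hsum : (s.map (fun y => pvDeg [] y)).sum = 0 := by
    simp [pvDegNil]
  rw [hsum] at hlen
  refine Prod.ext ?_ hset
  simp only
  rw [hlen]
  push_cast
  ring

-- A's four sequential ifs are: append pvHits and count its length
lemma pvStepA (s : List (Int × Int)) (st2 : Int × List ((Int × Int) × (Int × Int))) (p : Int × Int) :
    (let a := p.1
     let b := p.2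
     let nei1 : Int × Int := (a - 1, b)
     let nei2 : Int × Int := (a + 1, b)
     let nei3 : Int × Int := (a, b - 1)
     let nei4 : Int × Int := (a, b + 1)
     let st2 := if PySem.Set.contains s nei1 then (st2.1 + 1, PySem.Set.add st2.2 (nei1, (a, b))) else st2
     let st2 := if PySem.Set.contains s nei2 then (st2.1 + 1, PySem.Set.add st2.2 ((a, b), nei2)) else st2
     let st2 := if PySem.Set.contains s nei3 then (st2.1 + 1, PySem.Set.add st2.2 (nei3, (a, b))) else st2
     let st2 := if PySem.Set.contains s nei4 then (st2.1 + 1, PySem.Set.add st2.2 ((a, b), nei4)) else st2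
     st2)
    = (st2.1 + ((pvHits s p).length : Int), (pvHits s p).foldl PySem.Set.add st2.2) := by
  by_cases h1 : PySem.Set.contains s (p.1 - 1, p.2) = true <;>
  by_cases h2 : PySem.Set.contains s (p.1 + 1, p.2) = true <;>
  by_cases h3 : PySem.Set.contains s (p.1, p.2 - 1) = true <;>
  by_cases h4 : PySem.Set.contains s (p.1, p.2 + 1) = true <;>
    simp only [pvHits, pvItems, List.filter, h1, h2, h3, h4, List.foldl, List.map,
      List.length, Bool.not_eq_true, if_pos, if_neg] <;>
    simp <;> ring_nf

-- "append a block of f x and add k per element" over a list is the flatMap of the blocks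

-- "append a block of f x and add k per element" over a list is the flatMap of the blocks
lemma pvFoldBlocks {α E : Type} [BEq E] (f : α → List E) (k : Int) (xs : List α)
    (st : Int × List E) :
    xs.foldl (fun st2 x => (st2.1 + k * ((f x).length : Int), (f x).foldl PySem.Set.add st2.2)) st
      = (st.1 + k * ((xs.flatMap f).length : Int), (xs.flatMap f).foldl PySem.Set.add st.2) := by
  induction xs generalizing st with
  | nil => simp
  | cons x xs ih =>
      simp only [List.foldl_cons, ih, List.flatMap_cons, List.length_append, List.foldl_append]
      congr 1
      push_cast; ring

-- a conditional accumulate over a list is: filter, then append with k per kept element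

-- a conditional accumulate over a list is: filter, then append with k per kept element
lemma pvFoldIf {α E : Type} [BEq E] (l : List α) (P : α → Bool) (f : α → E) (k : Int)
    (c : Int) (es : List E) :
    l.foldl (fun st x => if P x then (st.1 + k, PySem.Set.add st.2 (f x)) else st) (c, es)
      = (c + k * (((l.filter P).length : Int)), ((l.filter P).map f).foldl PySem.Set.add es) := by
  induction l generalizing c es with
  | nil => simp
  | cons x l ih =>
      cases hP : P x <;> simp [List.filter_cons, hP, ih] <;> ring_nf

-- skipping elements that are already in the accumulated set does not change the fold

-- B's inner per-group loop: collect pvBcollect, add 2 per edge, and accumulate visited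
lemma pvStepsB (s : List (Int × Int)) (suf : List (Int × Int)) (c : Int)
    (es : List ((Int × Int) × (Int × Int))) (v : List (Int × Int)) :
    suf.foldl (fun (st2 : (Int × List ((Int × Int) × (Int × Int))) × List (Int × Int)) p =>
        let inner := (pvItems p).foldl (fun st3 qe =>
            if PySem.Set.contains s qe.1 && !(PySem.Set.contains st2.2 qe.1)
            then (st3.1 + 2, PySem.Set.add st3.2 qe.2) else st3) st2.1
        (inner, PySem.Set.add st2.2 p)) ((c, es), v)
      = ((c + 2 * ((pvBcollect s suf v).length : Int),
          (pvBcollect s suf v).foldl PySem.Set.add es), suf.foldl PySem.Set.add v) := by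
  induction suf generalizing c es v with
  | nil => simp [pvBcollect]
  | cons p t ih =>
      simp only [List.foldl_cons, pvFoldIf, pvBcollect, List.length_append, List.foldl_append,
        List.length_map, pvNew, ih]
      congr 2
      push_cast; ring

-- the combined invariant induction: scanning the suffix, A's incidence count exceeds twice
-- B's new-edge count by exactly the suffix-to-prefix adjacencies, and both set folds agree


-- ===== VERDICT (by name: the statement is the Claim_ definition above) =====
theorem count_closed_sides_in_grid_spec : Claim_equal_count_closed_sides_in_grid := by
  intro groups _ hpre
  unfold Spec_count_closed_sides_in_grid count_closed_sides_in_grid count_closed_sides_in_grid_alt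
  refine PySem.List.foldl_congr_mem groups _ _ _ ?_
  intro acc g hg
  obtain ⟨c, es⟩ := acc
  have h1 : (fun (st2 : Int × List ((Int × Int) × (Int × Int))) (p : Int × Int) =>
      let a := p.1
      let b := p.2
      let nei1 : Int × Int := (a - 1, b)
      let nei2 : Int × Int := (a + 1, b)
      let nei3 : Int × Int := (a, b - 1)
      let nei4 : Int × Int := (a, b + 1)
      let st2 := if PySem.Set.contains g.2 nei1 then (st2.1 + 1, PySem.Set.add st2.2 (nei1, (a, b))) else st2
      let st2 := if PySem.Set.contains g.2 nei2 then (st2.1 + 1, PySem.Set.add st2.2 ((a, b), nei2)) else st2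
      let st2 := if PySem.Set.contains g.2 nei3 then (st2.1 + 1, PySem.Set.add st2.2 (nei3, (a, b))) else st2
      let st2 := if PySem.Set.contains g.2 nei4 then (st2.1 + 1, PySem.Set.add st2.2 ((a, b), nei4)) else st2
      st2)
      = (fun st2 p => (st2.1 + 1 * ((pvHits g.2 p).length : Int),
          (pvHits g.2 p).foldl PySem.Set.add st2.2)) := by
    funext st2 p
    rw [pvStepA g.2 st2 p, one_mul]
  rw [h1, pvFoldBlocks (pvHits g.2) 1 g.2 (c, es), pvStepsB g.2 g.2 c es []]
  simp only
  rw [one_mul]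
  exact pvGroup g.2 (hpre g hg) c es
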